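-- pv_equiv track=rewrite | github.com/utilmeta/utilmeta-py | utilmeta/utils/functional/data.py | camel_case
-- ===== SOURCE A (Python) =====
-- def camel_case(name: str, reverse: bool = False) -> str:
--     cap = True
--     s = ''
--     for i, c in enumerate(name):
--         if reverse:
--             if c.isupper():
--                 if i:
--                     # not for first upper case
--                     s += '_'
--                 c = c.lower()
--         else:
--             if c == '_':
--                 cap = True
--                 continue
--             if cap:
--                 c = c.upper()
--                 cap = False
--         s += c
--     return s
-- ===== SOURCE B (Python) =====
-- def camel_case(name: str, reverse: bool = False) -> str:
--     if reverse:
--         frags = []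
--         for i, c in enumerate(name):
--             if c.isupper():
--                 frags.append(('_' if i else '') + c.lower())
--             else:
--                 frags.append(c)
--         return ''.join(frags)
--     return ''.join(p[:1].upper() + p[1:] for p in name.split('_'))
-- ===== Notes on version B (the rewrite author's own statement) =====
-- stated objective: idiomatic
-- what changed: Forward direction tokenizes with str.split on underscore and joins the parts with their first character uppercased, instead of a character loop carrying a cap flag; reverse direction builds a list of per-character fragments and joins once, instead of repeated string concatenation.
import Mathlib
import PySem

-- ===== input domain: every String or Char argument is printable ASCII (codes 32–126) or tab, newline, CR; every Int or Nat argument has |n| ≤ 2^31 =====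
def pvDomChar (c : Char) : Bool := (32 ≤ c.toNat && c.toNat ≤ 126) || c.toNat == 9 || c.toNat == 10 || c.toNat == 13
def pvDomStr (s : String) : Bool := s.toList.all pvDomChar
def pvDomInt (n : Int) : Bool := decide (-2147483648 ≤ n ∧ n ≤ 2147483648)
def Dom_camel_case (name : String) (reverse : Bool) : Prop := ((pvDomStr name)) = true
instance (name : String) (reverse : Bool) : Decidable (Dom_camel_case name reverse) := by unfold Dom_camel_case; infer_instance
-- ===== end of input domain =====

-- B replaces A's single flag-carrying character loop by split('_')/join with the first
-- character of each part uppercased (forward) and a fragment-list join (reverse): idiomatic.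

-- ===== PORT A =====
-- A's loop: state (cap, s); one step per (i, c) of enumerate(name).
def camelStepA (reverse : Bool) (st : Bool × List Char) (ic : Int × Char) : Bool × List Char :=
  let cap := st.1
  let s := st.2
  let i := ic.1
  let c := ic.2
  if reverse then
    if PySem.Chars.isupper c then
      -- 'if i: s += "_"' then 'c = c.lower()' then 's += c'
      let s := if i ≠ 0 then s ++ ['_'] else s
      (cap, s ++ [PySem.Chars.lowerChar c])
    else (cap, s ++ [c])
  else
    if c = '_' then (true, s)            -- 'cap = True; continue'
    else if cap then (false, s ++ [PySem.Chars.upperChar c])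
    else (cap, s ++ [c])

def camel_case (name : String) (reverse : Bool) : String :=
  String.mk ((PySem.List.enumerate name.toList).foldl (camelStepA reverse) (true, [])).2

-- ===== PORT B =====
-- port of Source B's 'p[:1].upper() + p[1:]'
def capFirst (p : List Char) : List Char :=
  PySem.Chars.upper (List.take 1 p) ++ List.drop 1 p

-- port of Source B's per-character fragment in the reverse branch
def revFrag (ic : Int × Char) : List Char :=
  if PySem.Chars.isupper ic.2 then
    (if ic.1 ≠ 0 then ['_'] else []) ++ [PySem.Chars.lowerChar ic.2]
  else [ic.2]

def camel_case_alt (name : String) (reverse : Bool) : String :=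
  if reverse then
    String.mk (PySem.Chars.join [] ((PySem.List.enumerate name.toList).map revFrag))
  else
    String.mk (PySem.Chars.join [] ((PySem.Chars.splitOn name.toList ['_']).map capFirst))

-- ===== PRECONDITION & SPEC =====
def Spec_camel_case (name : String) (reverse : Bool) (out : String) : Prop := out = camel_case_alt name reverse
instance (name : String) (reverse : Bool) (out : String) : Decidable (Spec_camel_case name reverse out) := by unfold Spec_camel_case; infer_instance

-- ===== CLAIM (what is proved, stated in full; the proofs are below) =====
def Claim_equal_camel_case : Prop := ∀ (name : String) (reverse : Bool), Dom_camel_case name reverse → Spec_camel_case name reverse (camel_case name reverse)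

-- ===== LEMMAS AND PROOFS =====

-- structural split on '_' (head fragment, remaining fragments)
def mySplit : List Char → List Char × List (List Char)
  | [] => ([], [])
  | c :: t =>
    let hr := mySplit t
    if c = '_' then ([], hr.1 :: hr.2) else (c :: hr.1, hr.2)

theorem join_nil_eq_flatten (ps : List (List Char)) :
    PySem.Chars.join [] ps = ps.flatten := by
  induction ps with
  | nil => rfl
  | cons p ps ih =>
    cases ps with
    | nil => simp [PySem.Chars.join, List.intercalate]
    | cons q qs =>
      simp only [PySem.Chars.join, List.intercalate] at *
      simp [List.intersperse, List.flatten] at *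
      simpa using ih

theorem capFirst_nil : capFirst [] = [] := rfl

theorem capFirst_cons (c : Char) (t : List Char) :
    capFirst (c :: t) = PySem.Chars.upperChar c :: t := by
  simp [capFirst, PySem.Chars.upper]

-- splitOn.go with sep = ['_'] computes mySplit (fuel exceeds the list length)
theorem go_spec : ∀ (fuel : Nat) (l cur : List Char) (acc : List (List Char)),
    l.length < fuel →
    PySem.Chars.splitOn.go ['_'] fuel l cur acc =
      acc.reverse ++ (cur.reverse ++ (mySplit l).1) :: (mySplit l).2 := by
  intro fuel
  induction fuel with
  | zero => intro l cur acc h; omega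
  | succ n ih =>
    intro l cur acc h
    cases l with
    | nil => simp [PySem.Chars.splitOn.go, mySplit]
    | cons c rest =>
      by_cases hc : c = '_'
      · subst hc
        have hp : List.isPrefixOf ['_'] ('_' :: rest) = true := by
          simp [List.isPrefixOf]
        rw [PySem.Chars.splitOn.go]
        simp only [hp, if_pos]
        have hd : List.drop (['_'] : List Char).length ('_' :: rest) = rest := rfl
        rw [hd, ih rest [] ((cur.reverse) :: acc) (by simp at h ⊢; omega)]
        simp [mySplit]
      · have hp : List.isPrefixOf ['_'] (c :: rest) = false := by
          simp only [List.isPrefixOf, Bool.and_true, beq_eq_false_iff_ne, ne_eq]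
          exact fun h => hc h.symm
        rw [PySem.Chars.splitOn.go]
        simp only [hp]
        rw [ih rest (c :: cur) acc (by simp at h ⊢; omega)]
        simp [mySplit, hc]

theorem splitOn_eq_mySplit (cs : List Char) :
    PySem.Chars.splitOn cs ['_'] = (mySplit cs).1 :: (mySplit cs).2 := by
  unfold PySem.Chars.splitOn
  rw [go_spec (cs.length + 1) cs [] [] (by omega)]
  simp

-- the value A's forward loop appends, as a function of the remaining input and the flag
def fRes (cs : List Char) (cap : Bool) : List Char :=
  (if cap then capFirst (mySplit cs).1 else (mySplit cs).1) ++
    ((mySplit cs).2.map capFirst).flatten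

theorem loopF_spec : ∀ (cs : List Char) (k : Int) (cap : Bool) (acc : List Char),
    ((PySem.List.enumerate cs k).foldl (camelStepA false) (cap, acc)).2 =
      acc ++ fRes cs cap := by
  intro cs
  induction cs with
  | nil => intro k cap acc; simp [PySem.List.enumerate, fRes, mySplit, capFirst_nil]
  | cons c t ih =>
    intro k cap acc
    rw [PySem.List.enumerate_cons, List.foldl_cons]
    have hstep : camelStepA false (cap, acc) (k, c) =
        if c = '_' then (true, acc)
        else if cap then (false, acc ++ [PySem.Chars.upperChar c])
        else (false, acc ++ [c]) := by
      cases cap <;> simp [camelStepA]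
    rw [hstep]
    by_cases hc : c = '_'
    · subst hc
      rw [if_pos rfl, ih]
      simp [fRes, mySplit, capFirst_nil]
    · cases cap with
      | true =>
        rw [if_neg hc, if_pos rfl, ih]
        simp [fRes, mySplit, hc, capFirst_cons]
      | false =>
        rw [if_neg hc, if_neg (Bool.false_ne_true), ih]
        simp [fRes, mySplit, hc]

theorem loopR_spec : ∀ (ps : List (Int × Char)) (cap : Bool) (acc : List Char),
    (ps.foldl (camelStepA true) (cap, acc)).2 = acc ++ (ps.map revFrag).flatten := by
  intro ps
  induction ps with
  | nil => intro cap acc; simp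
  | cons p t ih =>
    intro cap acc
    rw [List.foldl_cons]
    have hstep : camelStepA true (cap, acc) p = (cap, acc ++ revFrag p) := by
      simp [camelStepA, revFrag]
      split_ifs <;> simp
    rw [hstep, ih]
    simp

-- ===== VERDICT (by name: the statement is the Claim_ definition above) =====
theorem camel_case_spec : Claim_equal_camel_case := by
  intro name reverse _
  unfold Spec_camel_case camel_case camel_case_alt
  cases reverse with
  | false =>
    rw [loopF_spec name.toList 0 true [], if_neg (Bool.false_ne_true)]
    rw [join_nil_eq_flatten, splitOn_eq_mySplit]
    simp [fRes]
  | true =>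
    rw [loopR_spec, if_pos rfl, join_nil_eq_flatten]
    simp
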